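-- pv_equiv track=rewrite | github.com/HCrescent/Advent-of-Code | 2025/Python/day02.py | validator_p2
-- ===== SOURCE A (Python) =====
-- def validator_p2(number):
-- 	valid = True
-- 	n_string = str(number)
-- 	number_width = len(n_string)
-- 	whole_divisors = []
-- 	for n in range(1, number_width+1):
-- 		if number_width % n == 0:
-- 			whole_divisors.append(n)
-- 	for period in whole_divisors[:-1]:
-- 		segments = []
-- 		index = 0
-- 		while index < number_width:
-- 			segments.append(n_string[index:index+period])
-- 			index += period
-- 		if len(set(segments)) == 1:
-- 			valid = False
-- 			break
-- 	return valid
-- ===== SOURCE B (Python) =====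
-- def validator_p2(number):
-- 	s = str(number)
-- 	n = len(s)
-- 	return not any(n % p == 0 and s[p:] == s[:-p] for p in range(1, n))
-- ===== Notes on version B (the rewrite author's own statement) =====
-- stated objective: simpler
-- what changed: Replaces A's divisor-list construction, per-divisor segment partitioning and set-cardinality test with a single any() pass that checks the self-overlap identity s[p:] == s[:-p] for each proper divisor-length p.
import Mathlib
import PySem

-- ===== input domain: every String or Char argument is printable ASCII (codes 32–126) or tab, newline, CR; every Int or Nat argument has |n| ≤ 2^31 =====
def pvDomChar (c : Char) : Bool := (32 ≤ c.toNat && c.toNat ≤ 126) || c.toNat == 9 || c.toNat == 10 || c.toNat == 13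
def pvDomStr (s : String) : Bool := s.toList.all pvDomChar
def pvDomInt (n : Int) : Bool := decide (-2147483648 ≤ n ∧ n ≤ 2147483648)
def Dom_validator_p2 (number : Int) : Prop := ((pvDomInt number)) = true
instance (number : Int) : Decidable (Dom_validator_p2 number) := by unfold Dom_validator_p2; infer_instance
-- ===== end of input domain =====

-- B replaces A's divisor-list/segment-partition/set test with one pass checking the
-- self-overlap identity s[p:] == s[:-p] for each proper divisor-length p (objective: simpler).

-- ===== PORT A =====
-- A's inner while loop: segments.append(n_string[index:index+period]); index += period
-- (the 0 < period conjunct only makes the recursion total; A only calls it with period ≥ 1)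
def pvSegsA (n_string : List Char) (number_width period index : Int)
    (segments : List (List Char)) : List (List Char) :=
  if h : index < number_width ∧ 0 < period then
    pvSegsA n_string number_width period (index + period)
      (segments ++ [PySem.List.slice n_string (some index) (some (index + period))])
  else segments
termination_by (number_width - index).toNat
decreasing_by omega

-- A's outer for loop over whole_divisors[:-1], with its break (valid := false; break)
def pvDivLoopA (n_string : List Char) (number_width : Int) : List Int → Bool
  | [] => true
  | period :: rest =>
    let segments := pvSegsA n_string number_width period 0 []
    if (PySem.Set.ofList segments).length == 1 then false
    else pvDivLoopA n_string number_width rest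

def validator_p2 (number : Int) : Bool :=
  let n_string := PySem.Int.toChars number
  let number_width : Int := n_string.length
  let whole_divisors :=
    (PySem.List.pyRange 1 (number_width + 1)).foldl
      (fun acc n => if PySem.Int.mod number_width n == 0 then acc ++ [n] else acc) []
  pvDivLoopA n_string number_width (PySem.List.slice whole_divisors none (some (-1)))

-- ===== PORT B =====
def validator_p2_alt (number : Int) : Bool :=
  let s := PySem.Int.toChars number
  let n : Int := s.length
  !((PySem.List.pyRange 1 n).any (fun p =>
      PySem.Int.mod n p == 0 &&
      (PySem.List.slice s (some p) none == PySem.List.slice s none (some (-p)))))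

-- ===== PRECONDITION & SPEC =====
def Spec_validator_p2 (number : Int) (out : Bool) : Prop := out = validator_p2_alt number
instance (number : Int) (out : Bool) : Decidable (Spec_validator_p2 number out) := by unfold Spec_validator_p2; infer_instance

-- ===== CLAIM (what is proved, stated in full; the proofs are below) =====
def Claim_equal_validator_p2 : Prop := ∀ (number : Int), Dom_validator_p2 number → Spec_validator_p2 number (validator_p2 number)

-- ===== LEMMAS AND PROOFS =====

-- proof-side chunk view of A's while loop
def pvChunks (p : Nat) (t : List Char) : List (List Char) :=
  if h : 0 < p ∧ t ≠ [] then t.take p :: pvChunks p (t.drop p) else []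
termination_by t.length
decreasing_by
  rcases h with ⟨hp, ht⟩
  have : t.length ≠ 0 := by simpa [List.length_eq_zero_iff] using ht
  simp [List.length_drop]; omega

lemma pvChunks_pos {p : Nat} {t : List Char} (hp : 0 < p) (ht : t ≠ []) :
    pvChunks p t = t.take p :: pvChunks p (t.drop p) := by
  rw [pvChunks]; simp [hp, ht]

lemma pvChunks_nil {p : Nat} : pvChunks p [] = [] := by
  rw [pvChunks]; simp

-- negative-end slice: xs[:b] for b < 0
lemma pvSlice_to_neg {α : Type} (xs : List α) {b : Int} (hb : b < 0) :
    PySem.List.slice xs none (some b) = xs.take (xs.length + b).toNat := by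
  simp only [PySem.List.slice, PySem.List.clampIdx, hb, if_pos]
  split_ifs with h
  · have : (xs.length + b).toNat = 0 := by omega
    simp [this]
  · simp

-- A's while loop produces the p-chunks of the tail of the string
lemma pvSegsA_eq (s : List Char) (p : Int) (hp : 0 < p) :
    ∀ (i : Int), 0 ≤ i → ∀ acc,
      pvSegsA s s.length p i acc = acc ++ pvChunks p.toNat (s.drop i.toNat) := by
  have key : ∀ (m : Nat) (i : Int), (s.length - i).toNat ≤ m → 0 ≤ i → ∀ acc,
      pvSegsA s s.length p i acc = acc ++ pvChunks p.toNat (s.drop i.toNat) := by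
    intro m
    induction m with
    | zero =>
      intro i hm hi acc
      rw [pvSegsA]
      split_ifs with hcond
      · exact absurd hcond.1 (by omega)
      have hnil : s.drop i.toNat = [] := List.drop_eq_nil_iff.2 (by omega)
      rw [hnil, pvChunks_nil, List.append_nil]
    | succ m ih =>
      intro i hm hi acc
      rw [pvSegsA]
      split_ifs with h
      · obtain ⟨hiw, -⟩ := h
        have hslice : PySem.List.slice s (some i) (some (i + p)) = (s.drop i.toNat).take p.toNat := by
          obtain ⟨a, rfl⟩ : ∃ a : Nat, i = (a : Int) := ⟨i.toNat, by omega⟩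
          obtain ⟨b, hb⟩ : ∃ b : Nat, (a : Int) + p = (b : Int) := ⟨a + p.toNat, by omega⟩
          rw [hb, PySem.List.slice_natCast, Int.toNat_natCast]
          congr 1
          omega
        have hne : s.drop i.toNat ≠ [] := by
          intro hcon
          have := List.drop_eq_nil_iff.1 hcon
          omega
        rw [pvChunks_pos (by omega) hne]
        have hdd : (s.drop i.toNat).drop p.toNat = s.drop (i + p).toNat := by
          rw [List.drop_drop]
          congr 1
          omega
        rw [ih (i + p) (by omega) (by omega)]
        rw [hslice, hdd]
        simp
      · have hnil : s.drop i.toNat = [] := List.drop_eq_nil_iff.2 (by omega)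
        rw [hnil, pvChunks_nil, List.append_nil]
  intro i hi acc
  exact key (s.length - i).toNat i le_rfl hi acc

-- a Python set has exactly one element iff the list is nonempty with all elements equal
lemma pvSet_len_one_iff (l : List (List Char)) :
    ((PySem.Set.ofList l).length == 1) = true ↔ ∃ a, l ≠ [] ∧ ∀ x ∈ l, x = a := by
  rw [beq_iff_eq, List.length_eq_one_iff]
  constructor
  · rintro ⟨a, ha⟩
    have hmem : a ∈ PySem.Set.ofList l := by rw [ha]; simp
    have hal : a ∈ l := (PySem.Set.mem_ofList l a).1 hmem
    refine ⟨a, List.ne_nil_of_mem hal, fun x hx => ?_⟩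
    have : x ∈ PySem.Set.ofList l := (PySem.Set.mem_ofList l x).2 hx
    rw [ha] at this
    simpa using this
  · rintro ⟨a, hne, hall⟩
    have ha : a ∈ l := by
      obtain ⟨x, hx⟩ := List.exists_mem_of_ne_nil l hne
      rw [← hall x hx]
      exact hx
    have hnd := PySem.Set.nodup_ofList l
    have hmem : a ∈ PySem.Set.ofList l := (PySem.Set.mem_ofList l a).2 ha
    have hall' : ∀ y ∈ PySem.Set.ofList l, y = a := fun y hy =>
      hall y ((PySem.Set.mem_ofList l y).1 hy)
    refine ⟨a, ?_⟩
    revert hnd hmem hall'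
    generalize (PySem.Set.ofList l : List (List Char)) = mset
    intro hnd hmem hall'
    cases mset with
    | nil => cases hmem
    | cons b t =>
      have hb : b = a := hall' b (by simp)
      subst hb
      have ht : t = [] := by
        cases t with
        | nil => rfl
        | cons c u =>
          have hc : c = b := hall' c (by simp)
          subst hc
          simp at hnd
      simp [ht]

-- chunk side ↔ power form
lemma pvChunks_all_eq_iff (p : Nat) (hp : 0 < p) :
    ∀ (k : Nat) (s : List Char), s.length = (k + 1) * p →
      ((∀ c ∈ pvChunks p s, c = s.take p) ↔ s = (List.replicate (k + 1) (s.take p)).flatten) := by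
  intro k
  induction k with
  | zero =>
    intro s hlen
    replace hlen : s.length = p := by omega
    have hpos : 0 < s.length := by omega
    have hne : s ≠ [] := by intro hcon; rw [hcon] at hpos; simp at hpos
    have hdrop : s.drop p = [] := List.drop_eq_nil_iff.2 (by omega)
    rw [pvChunks_pos hp hne, hdrop, pvChunks_nil]
    have htake : s.take p = s := List.take_of_length_le (by omega)
    simp [htake]
  | succ k ih =>
    intro s hlen
    have hpos : 0 < s.length := by rw [hlen]; exact Nat.mul_pos (by omega) hp
    have hne : s ≠ [] := by intro hcon; rw [hcon] at hpos; simp at hpos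
    have hple : p ≤ s.length := by rw [hlen]; exact Nat.le_mul_of_pos_left p (by omega)
    set b := s.take p with hb
    set t := s.drop p with ht
    have hbl : b.length = p := by rw [hb, List.length_take]; omega
    have htl : t.length = (k + 1) * p := by
      rw [ht, List.length_drop, hlen, Nat.succ_mul, Nat.add_sub_cancel]
    have hst : b ++ t = s := List.take_append_drop p s
    have hrhs : (s = (List.replicate (k + 1 + 1) b).flatten) ↔
        (t = (List.replicate (k + 1) b).flatten) := by
      rw [List.replicate_succ, List.flatten_cons, ← hst]
      rw [List.append_cancel_left_eq]
    rw [pvChunks_pos hp hne, ← hb, ← ht, hrhs]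
    constructor
    · intro hall
      have hne' : t ≠ [] := by intro hcon; rw [hcon] at htl; simp at htl; omega
      have hfirst : t.take p ∈ pvChunks p t := by
        rw [pvChunks_pos hp hne']; simp
      have htb : t.take p = b := hall _ (by simp [hfirst])
      have := (ih t htl).1 (by
        intro c hc
        rw [htb]
        exact hall c (by simp [hc]))
      rwa [htb] at this
    · intro hpow
      have htb : t.take p = b := by
        rw [hpow, List.replicate_succ, List.flatten_cons, List.take_left' hbl]
      intro c hc
      simp only [List.mem_cons] at hc
      rcases hc with hc | hc
      · exact hc
      · have := (ih t htl).2 (by rw [htb]; exact hpow)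
        rw [← htb]
        exact this c hc

-- overlap side ↔ power form
lemma pvOverlap_iff (p : Nat) (hp : 0 < p) :
    ∀ (k : Nat) (s : List Char), s.length = (k + 1) * p →
      (s.drop p = s.take (s.length - p) ↔ s = (List.replicate (k + 1) (s.take p)).flatten) := by
  intro k
  induction k with
  | zero =>
    intro s hlen
    replace hlen : s.length = p := by omega
    have hdrop : s.drop p = [] := List.drop_eq_nil_iff.2 (by omega)
    have htake : s.take p = s := List.take_of_length_le (by omega)
    simp [hdrop, hlen, htake]
  | succ k ih =>
    intro s hlen
    have hpos : 0 < s.length := by rw [hlen]; exact Nat.mul_pos (by omega) hp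
    have hple : p ≤ s.length := by rw [hlen]; exact Nat.le_mul_of_pos_left p (by omega)
    set b := s.take p with hb
    set t := s.drop p with ht
    have hbl : b.length = p := by rw [hb, List.length_take]; omega
    have htl : t.length = (k + 1) * p := by
      rw [ht, List.length_drop, hlen, Nat.succ_mul, Nat.add_sub_cancel]
    have hst : b ++ t = s := List.take_append_drop p s
    have hrhs : (s = (List.replicate (k + 1 + 1) b).flatten) ↔
        (t = (List.replicate (k + 1) b).flatten) := by
      rw [List.replicate_succ, List.flatten_cons, ← hst, List.append_cancel_left_eq]
    have hlhs : (s.drop p = s.take (s.length - p)) ↔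
        (t.take p = b ∧ t.drop p = t.take (t.length - p)) := by
      rw [← ht, hlen]
      have hsub : (k + 1 + 1) * p - p = (k + 1) * p := by
        rw [Nat.succ_mul, Nat.add_sub_cancel]
      rw [hsub]
      have hn1 : p ≤ (k + 1) * p := Nat.le_mul_of_pos_left p (by omega)
      have htake2 : s.take ((k + 1) * p) = b ++ t.take ((k + 1) * p - p) := by
        conv_lhs => rw [← hst]
        rw [List.take_append, List.take_of_length_le (by rw [hbl]; exact hn1), hbl]
      rw [htake2]
      have hsub2 : (k + 1) * p - p = t.length - p := by rw [htl]
      rw [hsub2]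
      constructor
      · intro heq
        have h1 : t.take p = b := by
          rw [heq, List.take_left' hbl]
        have h2 : t.drop p = t.take (t.length - p) := by
          conv_lhs => rw [heq]
          rw [List.drop_left' hbl]
      


        exact ⟨h1, h2⟩
      · rintro ⟨h1, h2⟩
        conv_lhs => rw [← List.take_append_drop p t]
        rw [h1, h2]
    rw [hrhs, hlhs]
    constructor
    · rintro ⟨h1, h2⟩
      have := (ih t htl).1 h2
      rwa [h1] at this
    · intro hpow
      have h1 : t.take p = b := by
        rw [hpow, List.replicate_succ, List.flatten_cons, List.take_left' hbl]
      exact ⟨h1, (ih t htl).2 (by rw [h1]; exact hpow)⟩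

-- per-divisor equivalence of the two tests
lemma pvPer_p (s : List Char) (p : Int) (h1 : 0 < p) (h2 : p < (s.length : Int))
    (hdvd : PySem.Int.mod (s.length : Int) p = 0) :
    (((PySem.Set.ofList (pvSegsA s s.length p 0 [])).length == 1)) =
      (PySem.List.slice s (some p) none == PySem.List.slice s none (some (-p))) := by
  have hp' : 0 < p.toNat := by omega
  have hdn : p.toNat ∣ s.length := by
    have hdvd' : p ∣ (s.length : Int) := (PySem.Int.mod_eq_zero_iff_dvd _ _).1 hdvd
    have : ((p.toNat : Nat) : Int) ∣ ((s.length : Nat) : Int) := by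
      rwa [Int.toNat_of_nonneg (le_of_lt h1)]
    exact_mod_cast this
  obtain ⟨k, hk⟩ := hdn
  have hk1 : 1 ≤ k := by
    rcases Nat.eq_zero_or_pos k with h | h
    · subst h; omega
    · exact h
  obtain ⟨k', rfl⟩ : ∃ k', k = k' + 1 := ⟨k - 1, by omega⟩
  have hlen : s.length = (k' + 1) * p.toNat := by rw [hk]; ring
  have hpos : 0 < s.length := by rw [hlen]; exact Nat.mul_pos (by omega) hp'
  have hne : s ≠ [] := by intro hcon; rw [hcon] at hpos; simp at hpos
  rw [pvSegsA_eq s p h1 0 le_rfl []]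
  simp only [Int.toNat_zero, List.drop_zero, List.nil_append]
  rw [Bool.eq_iff_iff, pvSet_len_one_iff, beq_iff_eq]
  rw [PySem.List.slice_from s (le_of_lt h1)]
  rw [pvSlice_to_neg s (by omega : -p < 0)]
  have htn : ((s.length : Int) + -p).toNat = s.length - p.toNat := by omega
  rw [htn]
  have hhead : (∃ a, pvChunks p.toNat s ≠ [] ∧ ∀ c ∈ pvChunks p.toNat s, c = a) ↔
      (∀ c ∈ pvChunks p.toNat s, c = s.take p.toNat) := by
    constructor
    · rintro ⟨a, -, hall⟩
      have hfirst : s.take p.toNat ∈ pvChunks p.toNat s := by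
        rw [pvChunks_pos hp' hne]; simp
      have := hall _ hfirst
      intro c hc
      rw [hall c hc, this]
    · intro hall
      refine ⟨s.take p.toNat, ?_, hall⟩
      rw [pvChunks_pos hp' hne]
      simp
  rw [hhead, pvChunks_all_eq_iff p.toNat hp' k' s hlen, ← pvOverlap_iff p.toNat hp' k' s hlen]

-- A's break-loop is a pure "no divisor passes the test"
lemma pvDivLoopA_eq (s : List Char) (w : Int) (l : List Int) :
    pvDivLoopA s w l = !(l.any fun p => (PySem.Set.ofList (pvSegsA s w p 0 [])).length == 1) := by
  induction l with
  | nil => simp [pvDivLoopA]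
  | cons p rest ih =>
    simp only [pvDivLoopA, List.any_cons]
    split_ifs with h
    · simp [h]
    · simp only [ih]
      cases hb : ((PySem.Set.ofList (pvSegsA s w p 0 [])).length == 1) with
      | true => exact absurd hb h
      | false => simp

lemma pvMain (s : List Char) :
    pvDivLoopA s (s.length : Int)
      (PySem.List.slice
        ((PySem.List.pyRange 1 ((s.length : Int) + 1)).foldl
          (fun acc n => if PySem.Int.mod (s.length : Int) n == 0 then acc ++ [n] else acc) [])
        none (some (-1)))
    = !((PySem.List.pyRange 1 (s.length : Int)).any (fun p =>
        PySem.Int.mod (s.length : Int) p == 0 &&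
        (PySem.List.slice s (some p) none == PySem.List.slice s none (some (-p))))) := by
  have hfold := PySem.List.foldl_append_if
    (fun n => PySem.Int.mod (s.length : Int) n == 0) (fun n => n)
    (PySem.List.pyRange 1 ((s.length : Int) + 1)) []
  simp only [List.nil_append] at hfold
  rw [hfold, List.map_id']
  rcases Nat.eq_zero_or_pos s.length with hn | hn
  · have hs : s = [] := List.eq_nil_of_length_eq_zero hn
    subst hs
    decide
  · have h1n : (1 : Int) ≤ (s.length : Int) := by exact_mod_cast hn
    rw [PySem.List.pyRange_one_succ_right h1n, List.filter_append]
    have hlast : List.filter (fun n => PySem.Int.mod (s.length : Int) n == 0) [(s.length : Int)]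
        = [(s.length : Int)] := by
      have : PySem.Int.mod (s.length : Int) (s.length : Int) = 0 :=
        (PySem.Int.mod_eq_zero_iff_dvd _ _).2 dvd_rfl
      simp [List.filter, this]
    rw [hlast]
    set L := List.filter (fun n => PySem.Int.mod (s.length : Int) n == 0)
      (PySem.List.pyRange 1 (s.length : Int)) with hL
    rw [pvSlice_to_neg _ (by norm_num : (-1 : Int) < 0)]
    have hlen2 : (((L ++ [(s.length : Int)]).length : Int) + -1).toNat
        = (L ++ [(s.length : Int)]).length - 1 := by omega
    rw [hlen2, ← List.dropLast_eq_take, List.dropLast_concat]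
    rw [pvDivLoopA_eq]
    congr 1
    rw [hL, List.any_filter]
    rw [Bool.eq_iff_iff, List.any_eq_true, List.any_eq_true]
    constructor
    · rintro ⟨p, hp, hcond⟩
      rw [PySem.List.mem_pyRange_one] at hp
      refine ⟨p, PySem.List.mem_pyRange_one.2 hp, ?_⟩
      rw [Bool.and_eq_true] at hcond ⊢
      refine ⟨hcond.1, ?_⟩
      rw [← pvPer_p s p (by omega) (by omega) (by simpa [beq_iff_eq] using hcond.1)]
      exact hcond.2
    · rintro ⟨p, hp, hcond⟩
      rw [PySem.List.mem_pyRange_one] at hp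
      refine ⟨p, PySem.List.mem_pyRange_one.2 hp, ?_⟩
      rw [Bool.and_eq_true] at hcond ⊢
      refine ⟨hcond.1, ?_⟩
      rw [pvPer_p s p (by omega) (by omega) (by simpa [beq_iff_eq] using hcond.1)]
      exact hcond.2


-- ===== VERDICT (by name: the statement is the Claim_ definition above) =====
theorem validator_p2_spec : Claim_equal_validator_p2 := by
  intro number _
  show validator_p2 number = validator_p2_alt number
  unfold validator_p2 validator_p2_alt
  exact pvMain (PySem.Int.toChars number)
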